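-- pv_equiv track=rewrite | github.com/a1ip/checkio-17 | bacteria-colonies.py | vonNeuman
-- ===== SOURCE A (Python) =====
-- def vonNeuman(grid,c,rank, val):
--     # print "call of vanNeuman"
--     # print "center", c
--     d = 1 + 2*rank
--     top_left = c[0]-rank, c[1]-rank
--     grid_slice = grid[top_left[0]:top_left[0]+d][top_left[1]:top_left[1]+d]
--     border_points = []
--     for i in range(max(0,top_left[0]), min(top_left[0]+d,len(grid))):
--         for j in range(max(0,top_left[1]), min(top_left[1]+d,len(grid[0]))):
--             # print i,j
--             a = (i,j)
--             if abs(a[0]-c[0])+abs(a[1]-c[1]) == rank: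
--                 # print 'adding', i,j
--                 border_points.append(grid[i][j])
--     # pp.pprint(grid_slice)
--     if val == 1:
--         return all(border_points)
--     else:
--         # print "zero" ,border_points
--         return all(k == 0 for k in border_points)
-- ===== SOURCE B (Python) =====
-- def vonNeuman(grid, c, rank, val):
--     # Walk only the diamond perimeter: for each row offset dx there are at most
--     # two border cells, c1 +/- (rank - |dx|); dx is clipped to the grid's rows.
--     rows = len(grid)
--     cols = len(grid[0]) if grid else 0
--     c0, c1 = c[0], c[1]
--     for dx in range(max(-rank, -c0), min(rank, rows - 1 - c0) + 1):
--         dy = rank - abs(dx)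
--         for j in ([c1] if dy == 0 else [c1 - dy, c1 + dy]):
--             if 0 <= j < cols:
--                 k = grid[c0 + dx][j]
--                 if (k == 0) if val == 1 else (k != 0):
--                     return False
--     return True
-- ===== Notes on version B (the rewrite author's own statement) =====
-- stated objective: alternative
-- what changed: Instead of scanning every cell of the clipped (2*rank+1)^2 window and testing its Manhattan distance, B enumerates only the diamond perimeter: for each in-grid row offset dx it visits the at most two border cells c1 +/- (rank-|dx|), short-circuiting on the first bad cell.
import Mathlib
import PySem

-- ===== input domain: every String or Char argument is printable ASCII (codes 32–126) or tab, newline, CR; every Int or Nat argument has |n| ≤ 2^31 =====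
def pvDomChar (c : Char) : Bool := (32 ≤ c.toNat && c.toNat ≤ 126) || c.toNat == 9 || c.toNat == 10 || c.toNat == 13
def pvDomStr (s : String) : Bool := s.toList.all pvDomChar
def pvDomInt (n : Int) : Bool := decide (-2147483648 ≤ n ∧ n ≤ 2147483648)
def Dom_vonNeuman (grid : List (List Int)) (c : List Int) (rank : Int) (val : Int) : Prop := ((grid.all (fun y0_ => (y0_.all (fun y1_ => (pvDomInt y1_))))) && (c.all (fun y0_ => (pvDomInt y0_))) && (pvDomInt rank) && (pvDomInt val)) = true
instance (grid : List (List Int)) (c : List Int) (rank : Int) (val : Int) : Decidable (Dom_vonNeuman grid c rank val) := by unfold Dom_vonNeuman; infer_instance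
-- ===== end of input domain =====

-- B visits only the diamond perimeter (at most two cells per in-grid row offset) instead of
-- scanning the whole clipped window and testing each cell's Manhattan distance (alternative
-- algorithm; not measured faster on the generated inputs).


-- ===== PORT A =====
-- Literal port of A; the dead `grid_slice` binding (unused, slicing never raises) is omitted.
def vonNeuman (grid : List (List Int)) (c : List Int) (rank : Int) (val : Int) : Bool :=
  let d := 1 + 2 * rank
  let tl0 := PySem.List.pyGetD c 0 0 - rank
  let tl1 := PySem.List.pyGetD c 1 0 - rank
  let border_points : List Int :=
    (PySem.List.pyRange (max 0 tl0) (min (tl0 + d) (grid.length : Int)) 1).foldl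
      (fun acc i =>
        (PySem.List.pyRange (max 0 tl1) (min (tl1 + d) ((PySem.List.pyGetD grid 0 []).length : Int)) 1).foldl
          (fun acc2 j =>
            if |i - PySem.List.pyGetD c 0 0| + |j - PySem.List.pyGetD c 1 0| == rank then
              acc2 ++ [PySem.List.pyGetD (PySem.List.pyGetD grid i []) j 0]
            else acc2) acc) []
  if val == 1 then border_points.all (fun k => !(k == 0))
  else border_points.all (fun k => k == 0)

-- ===== PORT B =====
def vonNeuman_alt (grid : List (List Int)) (c : List Int) (rank : Int) (val : Int) : Bool :=
  let rows : Int := grid.length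
  let cols : Int := match grid with | [] => 0 | r :: _ => (r.length : Int)
  let c0 := PySem.List.pyGetD c 0 0
  let c1 := PySem.List.pyGetD c 1 0
  (PySem.List.pyRange (max (-rank) (-c0)) (min rank (rows - 1 - c0) + 1) 1).all (fun dx =>
    let dy := rank - |dx|
    (if dy == 0 then [c1] else [c1 - dy, c1 + dy]).all (fun j =>
      if 0 ≤ j ∧ j < cols then
        let k := PySem.List.pyGetD (PySem.List.pyGetD grid (c0 + dx) []) j 0
        !(if val == 1 then k == 0 else !(k == 0))
      else true))

-- ===== PRECONDITION & SPEC =====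
-- Pre_ holds exactly where A returns: it excludes c with fewer than two coordinates (A raises
-- IndexError reading c[1]) and ragged grids where some visited border cell (within row 0's column
-- range, at Manhattan distance rank from the centre) lies beyond its shorter row (IndexError).
def Pre_vonNeuman (grid : List (List Int)) (c : List Int) (rank : Int) (val : Int) : Prop :=
  2 ≤ c.length ∧
  ∀ p ∈ List.range grid.length, ∀ q ∈ List.range (grid.headD []).length,
    |((p : Int)) - PySem.List.pyGetD c 0 0| + |((q : Int)) - PySem.List.pyGetD c 1 0| = rank →
    q < (grid.getD p []).length
instance (grid : List (List Int)) (c : List Int) (rank : Int) (val : Int) : Decidable (Pre_vonNeuman grid c rank val) := by unfold Pre_vonNeuman; infer_instance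
def pvWitness_vonNeuman : List (List Int) × List Int × Int × Int := ([[1, 0], [0, 1]], [0, 0], 1, 1)
def Spec_vonNeuman (grid : List (List Int)) (c : List Int) (rank : Int) (val : Int) (out : Bool) : Prop := out = vonNeuman_alt grid c rank val
instance (grid : List (List Int)) (c : List Int) (rank : Int) (val : Int) (out : Bool) : Decidable (Spec_vonNeuman grid c rank val out) := by unfold Spec_vonNeuman; infer_instance

-- ===== CLAIM (what is proved, stated in full; the proofs are below) =====
def Claim_equal_vonNeuman : Prop := ∀ (grid : List (List Int)) (c : List Int) (rank : Int) (val : Int), Dom_vonNeuman grid c rank val → Pre_vonNeuman grid c rank val → Spec_vonNeuman grid c rank val (vonNeuman grid c rank val)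

-- ===== LEMMAS AND PROOFS =====

def pvGood (grid : List (List Int)) (c : List Int) (rank : Int) (val : Int) : Prop :=
  ∀ i j : Int, 0 ≤ i → i < (grid.length : Int) → 0 ≤ j →
    j < ((PySem.List.pyGetD grid 0 []).length : Int) →
    |i - PySem.List.pyGetD c 0 0| + |j - PySem.List.pyGetD c 1 0| = rank →
    (if val == 1 then !(PySem.List.pyGetD (PySem.List.pyGetD grid i []) j 0 == 0)
     else (PySem.List.pyGetD (PySem.List.pyGetD grid i []) j 0 == 0)) = true
lemma pvGen (L M c0 c1 rank : Int) (g : Int → Int → Int) (p : Int → Bool) :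
    (∀ x : Int, (∃ a, (max 0 (c0 - rank) ≤ a ∧ a < min (c0 - rank + (1 + 2 * rank)) L) ∧
        ∃ b, ((max 0 (c1 - rank) ≤ b ∧ b < min (c1 - rank + (1 + 2 * rank)) M) ∧
          (|a - c0| + |b - c1| == rank) = true) ∧ g a b = x) → p x = true)
      ↔ ∀ i j : Int, 0 ≤ i → i < L → 0 ≤ j → j < M → |i - c0| + |j - c1| = rank →
          p (g i j) = true := by
  constructor
  · intro h i j hi1 hi2 hj1 hj2 hm
    apply h
    have hm' := hm
    simp only [Int.abs_eq_natAbs] at hm'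
    refine ⟨i, ⟨by omega, by omega⟩, j, ⟨⟨by omega, by omega⟩, by simpa using hm⟩, rfl⟩
  · rintro h x ⟨a, ⟨ha1, ha2⟩, b, ⟨⟨hb1, hb2⟩, hm⟩, rfl⟩
    exact h a b (by omega) (by omega) (by omega) (by omega) (by simpa using hm)
lemma vonNeuman_iff (grid : List (List Int)) (c : List Int) (rank val : Int) :
    vonNeuman grid c rank val = true ↔ pvGood grid c rank val := by
  unfold vonNeuman pvGood
  simp only [PySem.List.foldl_append_if, PySem.List.foldl_append_eq_flatMap, List.nil_append]
  by_cases hv : (val == 1) = true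
  · simp only [hv, if_true, List.all_eq_true, List.mem_flatMap, List.mem_map,
      List.mem_filter, PySem.List.mem_pyRange_one]
    exact pvGen _ _ _ _ _ (fun a b => PySem.List.pyGetD (PySem.List.pyGetD grid a []) b 0)
      (fun k => !(k == 0))
  · simp only [hv, Bool.false_eq_true, if_false, List.all_eq_true, List.mem_flatMap,
      List.mem_map, List.mem_filter, PySem.List.mem_pyRange_one]
    exact pvGen _ _ _ _ _ (fun a b => PySem.List.pyGetD (PySem.List.pyGetD grid a []) b 0)
      (fun k => k == 0)
lemma pvGenB (L M c0 c1 rank : Int) (g : Int → Int → Int) (p : Int → Bool) :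
    (∀ dx : Int, max (-rank) (-c0) ≤ dx ∧ dx < min rank (L - 1 - c0) + 1 →
       ∀ j ∈ (if (rank - |dx| == 0) = true then [c1]
              else [c1 - (rank - |dx|), c1 + (rank - |dx|)]),
         (if 0 ≤ j ∧ j < M then p (g (c0 + dx) j) else true) = true)
      ↔ ∀ i j : Int, 0 ≤ i → i < L → 0 ≤ j → j < M →
          |i - c0| + |j - c1| = rank → p (g i j) = true := by
  constructor
  · intro h i j hi1 hi2 hj1 hj2 hm
    have e1 : |i - c0| = ((i - c0).natAbs : Int) := Int.abs_eq_natAbs _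
    have e2 : |j - c1| = ((j - c1).natAbs : Int) := Int.abs_eq_natAbs _
    have hm' : ((i - c0).natAbs : Int) + ((j - c1).natAbs : Int) = rank := by
      rw [← e1, ← e2]; exact hm
    have hmem : j ∈ (if (rank - |i - c0| == 0) = true then [c1]
        else [c1 - (rank - |i - c0|), c1 + (rank - |i - c0|)]) := by
      by_cases hdy : rank - |i - c0| = 0
      · rw [if_pos (by simpa using hdy)]
        have : j = c1 := by rw [e1] at hdy; omega
        simp [this]
      · rw [if_neg (by simpa using hdy)]
        rw [e1] at hdy ⊢
        simp only [List.mem_cons, List.not_mem_nil, or_false]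
        omega
    have := h (i - c0) ⟨by omega, by omega⟩ j hmem
    rw [if_pos ⟨hj1, hj2⟩] at this
    rwa [show c0 + (i - c0) = i by ring] at this
  · intro h dx ⟨hd1, hd2⟩ j hj
    by_cases hjM : 0 ≤ j ∧ j < M
    · rw [if_pos hjM]
      have e1 : |dx| = ((dx).natAbs : Int) := Int.abs_eq_natAbs _
      apply h (c0 + dx) j (by omega) (by omega) hjM.1 hjM.2
      have e3 : |c0 + dx - c0| = ((dx).natAbs : Int) := by
        rw [show c0 + dx - c0 = dx by ring, e1]
      have e2 : |j - c1| = ((j - c1).natAbs : Int) := Int.abs_eq_natAbs _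
      by_cases hdy : rank - |dx| = 0
      · rw [if_pos (by simpa using hdy)] at hj
        simp only [List.mem_singleton] at hj
        rw [e3, e2, hj]
        rw [e1] at hdy
        omega
      · rw [if_neg (by simpa using hdy)] at hj
        simp only [List.mem_cons, List.not_mem_nil, or_false] at hj
        rw [e3, e2]
        rw [e1] at hdy hj
        rcases hj with hj | hj <;> rw [hj] <;> omega
    · rw [if_neg hjM]
lemma vonNeuman_alt_iff (grid : List (List Int)) (c : List Int) (rank val : Int) :
    vonNeuman_alt grid c rank val = true ↔ pvGood grid c rank val := by
  unfold vonNeuman_alt pvGood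
  have hcols : (match grid with | [] => (0:Int) | r :: _ => (r.length : Int))
      = ((PySem.List.pyGetD grid 0 []).length : Int) := by
    cases grid <;> simp [PySem.List.pyGetD]
  rw [hcols]
  simp only [List.all_eq_true, PySem.List.mem_pyRange_one]
  have hnot : ∀ k : Int, (!(if (val == 1) = true then k == 0 else !(k == 0)))
      = (if (val == 1) = true then !(k == 0) else (k == 0)) := by
    intro k; by_cases h : (val == 1) = true <;> simp [h]
  simp only [hnot]
  exact pvGenB _ _ _ _ _ (fun a b => PySem.List.pyGetD (PySem.List.pyGetD grid a []) b 0)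
    (fun k => if (val == 1) = true then !(k == 0) else (k == 0))

lemma ports_eq (grid : List (List Int)) (c : List Int) (rank val : Int) :
    vonNeuman grid c rank val = vonNeuman_alt grid c rank val := by
  rw [Bool.eq_iff_iff, vonNeuman_iff, vonNeuman_alt_iff]

-- ===== VERDICT (by name: the statement is the Claim_ definition above) =====
theorem vonNeuman_spec : Claim_equal_vonNeuman := by
  intro grid c rank val _ _
  exact ports_eq grid c rank val
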